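-- pv_equiv track=rewrite | github.com/Ryuuy/Lime-SDR-Doppler | python/spectrum.py | optimize_selection
-- ===== SOURCE A (Python) =====
-- def optimize_selection(arr, max_zeros=200):
--     """
--     优化选择数组中尽可能多的 1，同时确保 0 的数量不超过 max_zeros。
--
--     Args:
--         arr (list): 输入数组，元素为 0 或 1。
--         max_zeros (int): 允许的最大 0 的数量。
--
--     Returns:
--         dict: 包含最佳 z, x, y 的结果，以及选取的 1 和 0 的数量。
--     """
--     best_z, best_x, best_y = 0, 0, 0
--     max_ones = 0
--     best_zero_count = 0
--
--     n = len(arr)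
--
--     # 遍历可能的 z, x, y 组合
--     for z in range(20):
--         for x in range(1, 20):  # 步长至少为 1
--             for y in range(1, 30):  # y 不能超过剩余长度
--                 ones_count = 0
--                 zeros_count = 0
--
--                 # 从 z 开始，每间隔 x 个位置，选取连续 y 个元素
--                 for start in range(z, n, x):
--                     segment = arr[start:start + y]
--                     ones_count += segment.count(1)
--                     zeros_count += segment.count(0)
--
--                     # 提前停止计算，如果 0 的数量超出限制
--                     if zeros_count > max_zeros:
--                         break
--
--                 # 更新最佳结果
--                 if zeros_count <= max_zeros and ones_count > max_ones:
--                     best_z, best_x, best_y = z, x, y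
--                     max_ones = ones_count
--                     best_zero_count = zeros_count
--
--     return {
--         "z": best_z,
--         "x": best_x,
--         "y": best_y,
--         "ones_count": max_ones,
--         "zeros_count": best_zero_count,
--     }
-- ===== SOURCE B (Python) =====
-- def optimize_selection(arr, max_zeros=200):
--     n = len(arr)
--     # prefix-count arrays: p1[k] / p0[k] = number of 1s / 0s among arr[:k],
--     # so each segment's counts cost O(1) instead of an O(y) slice-and-count.
--     p1 = [0]
--     p0 = [0]
--     s1 = 0
--     s0 = 0
--     for v in arr:
--         s1 += 1 if v == 1 else 0
--         s0 += 1 if v == 0 else 0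
--         p1.append(s1)
--         p0.append(s0)
--     combos = [(z, x, y) for z in range(20) for x in range(1, 20) for y in range(1, 30)]
--     best_z, best_x, best_y = 0, 0, 0
--     max_ones = 0
--     best_zero_count = 0
--     for z, x, y in combos:
--         ones_count = 0
--         zeros_count = 0
--         for start in range(z, n, x):
--             e = min(start + y, n)
--             ones_count += p1[e] - p1[start]
--             zeros_count += p0[e] - p0[start]
--             if zeros_count > max_zeros:
--                 break
--         if zeros_count <= max_zeros and ones_count > max_ones:
--             best_z, best_x, best_y = z, x, y
--             max_ones = ones_count
--             best_zero_count = zeros_count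
--     return {
--         "z": best_z,
--         "x": best_x,
--         "y": best_y,
--         "ones_count": max_ones,
--         "zeros_count": best_zero_count,
--     }
-- ===== Notes on version B (the rewrite author's own statement) =====
-- stated objective: faster
-- what changed: B precomputes prefix-count arrays for 1s and 0s once and looks each segment's counts up in O(1) arithmetic instead of slicing and scanning every segment, and it drives a single loop over a precomputed flat list of (z,x,y) combos instead of three nested range loops.
import Mathlib
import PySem

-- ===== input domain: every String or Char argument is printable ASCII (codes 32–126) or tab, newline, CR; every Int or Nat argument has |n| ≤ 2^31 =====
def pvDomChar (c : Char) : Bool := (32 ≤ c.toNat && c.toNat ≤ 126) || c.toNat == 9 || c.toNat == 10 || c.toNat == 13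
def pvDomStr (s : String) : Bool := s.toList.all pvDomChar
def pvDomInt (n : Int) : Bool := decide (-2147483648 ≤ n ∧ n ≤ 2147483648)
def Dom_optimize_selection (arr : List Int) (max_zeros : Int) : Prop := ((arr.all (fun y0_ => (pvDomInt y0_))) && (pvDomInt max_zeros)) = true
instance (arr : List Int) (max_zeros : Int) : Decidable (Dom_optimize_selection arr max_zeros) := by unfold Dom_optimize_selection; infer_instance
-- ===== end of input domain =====

-- B replaces A's per-segment slice-and-count by O(1) lookups in prefix-count arrays built
-- once, and iterates one flat precomputed combo list instead of three nested range loops;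
-- measurably faster by a constant factor.

-- ===== PORT A =====
-- inner 'for start in range(z, n, x)' loop of A, with the early break on zeros_count
def pvInnerA (arr : List Int) (mz y : Int) : List Int → Int × Int → Int × Int
  | [], acc => acc
  | s :: rest, acc =>
    let seg := PySem.List.slice arr (some s) (some (s + y))
    let o' := acc.1 + (PySem.List.count seg 1 : Int)
    let z' := acc.2 + (PySem.List.count seg 0 : Int)
    if mz < z' then (o', z') else pvInnerA arr mz y rest (o', z')

-- the triple 'for z / for x / for y' loop nest of A, carrying (best_z, best_x, best_y, max_ones, best_zero_count)
def pvSearchA (arr : List Int) (max_zeros : Int) : Int × Int × Int × Int × Int :=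
  let n : Int := PySem.List.len arr
  (PySem.List.pyRange 0 20 1).foldl (fun st z =>
    (PySem.List.pyRange 1 20 1).foldl (fun st x =>
      (PySem.List.pyRange 1 30 1).foldl (fun st y =>
        let r := pvInnerA arr max_zeros y (PySem.List.pyRange z n x) (0, 0)
        if r.2 ≤ max_zeros ∧ st.2.2.2.1 < r.1 then (z, x, y, r.1, r.2) else st) st) st)
    ((0:Int), (0:Int), (0:Int), (0:Int), (0:Int))

def optimize_selection (arr : List Int) (max_zeros : Int) : List (String × Int) :=
  let st := pvSearchA arr max_zeros
  [("z", st.1), ("x", st.2.1), ("y", st.2.2.1), ("ones_count", st.2.2.2.1), ("zeros_count", st.2.2.2.2)]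

-- ===== PORT B =====
def pvF1 (v : Int) : Int := if v = 1 then 1 else 0
def pvF0 (v : Int) : Int := if v = 0 then 1 else 0

-- B's preprocessing loop: running sums s1/s0 appended to the prefix arrays p1/p0
def pvPrefixes (arr : List Int) : List Int × List Int :=
  let r := arr.foldl (fun acc v =>
      let s1 := acc.2.2.1 + pvF1 v
      let s0 := acc.2.2.2 + pvF0 v
      (acc.1 ++ [s1], acc.2.1 ++ [s0], s1, s0))
    (([0] : List Int), ([0] : List Int), (0:Int), (0:Int))
  (r.1, r.2.1)

-- B's inner loop: O(1) prefix-difference counts per segment, same early break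
def pvInnerB (p1 p0 : List Int) (mz n y : Int) : List Int → Int × Int → Int × Int
  | [], acc => acc
  | s :: rest, acc =>
    let e := min (s + y) n
    let o' := acc.1 + (PySem.List.pyGetD p1 e 0 - PySem.List.pyGetD p1 s 0)
    let z' := acc.2 + (PySem.List.pyGetD p0 e 0 - PySem.List.pyGetD p0 s 0)
    if mz < z' then (o', z') else pvInnerB p1 p0 mz n y rest (o', z')

-- the flat combo list  [(z, x, y) for z in range(20) for x in range(1,20) for y in range(1,30)]
def pvCombos : List (Int × Int × Int) :=
  (PySem.List.pyRange 0 20 1).flatMap (fun z =>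
    (PySem.List.pyRange 1 20 1).flatMap (fun x =>
      (PySem.List.pyRange 1 30 1).map (fun y => (z, x, y))))

-- B's single 'for z, x, y in combos' loop over the flat combo list
def pvSearchB (arr : List Int) (max_zeros : Int) : Int × Int × Int × Int × Int :=
  let n : Int := PySem.List.len arr
  let ps := pvPrefixes arr
  pvCombos.foldl (fun st c =>
      let r := pvInnerB ps.1 ps.2 max_zeros n c.2.2 (PySem.List.pyRange c.1 n c.2.1) (0, 0)
      if r.2 ≤ max_zeros ∧ st.2.2.2.1 < r.1 then (c.1, c.2.1, c.2.2, r.1, r.2) else st)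
    ((0:Int), (0:Int), (0:Int), (0:Int), (0:Int))

def optimize_selection_alt (arr : List Int) (max_zeros : Int) : List (String × Int) :=
  let st := pvSearchB arr max_zeros
  [("z", st.1), ("x", st.2.1), ("y", st.2.2.1), ("ones_count", st.2.2.2.1), ("zeros_count", st.2.2.2.2)]

-- ===== PRECONDITION & SPEC =====
def Spec_optimize_selection (arr : List Int) (max_zeros : Int) (out : List (String × Int)) : Prop := out = optimize_selection_alt arr max_zeros
instance (arr : List Int) (max_zeros : Int) (out : List (String × Int)) : Decidable (Spec_optimize_selection arr max_zeros out) := by unfold Spec_optimize_selection; infer_instance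

-- ===== CLAIM (what is proved, stated in full; the proofs are below) =====
def Claim_equal_optimize_selection : Prop := ∀ (arr : List Int) (max_zeros : Int), Dom_optimize_selection arr max_zeros → Spec_optimize_selection arr max_zeros (optimize_selection arr max_zeros)

-- ===== LEMMAS AND PROOFS =====

-- running-sum list: pvPresums f s l = [s + f l0, s + f l0 + f l1, …]
def pvPresums (f : Int → Int) (s : Int) : List Int → List Int
  | [] => []
  | v :: r => (s + f v) :: pvPresums f (s + f v) r

theorem pvPrefixes_fold (arr : List Int) (p1 p0 : List Int) (s1 s0 : Int) :
    arr.foldl (fun acc v =>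
      let s1 := acc.2.2.1 + pvF1 v
      let s0 := acc.2.2.2 + pvF0 v
      (acc.1 ++ [s1], acc.2.1 ++ [s0], s1, s0)) (p1, p0, s1, s0)
    = (p1 ++ pvPresums pvF1 s1 arr, p0 ++ pvPresums pvF0 s0 arr,
       s1 + (arr.map pvF1).sum, s0 + (arr.map pvF0).sum) := by
  induction arr generalizing p1 p0 s1 s0 with
  | nil => simp [pvPresums]
  | cons v r ih => simp [pvPresums, ih, List.append_assoc]; constructor <;> ring

theorem pvPrefixes_eq (arr : List Int) :
    pvPrefixes arr = (0 :: pvPresums pvF1 0 arr, 0 :: pvPresums pvF0 0 arr) := by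
  simp [pvPrefixes, pvPrefixes_fold]

theorem length_pvPresums (f : Int → Int) (l : List Int) : ∀ s, (pvPresums f s l).length = l.length := by
  induction l with
  | nil => intro s; rfl
  | cons v r ih => intro s; simp [pvPresums, ih]

theorem getD_pvPresums (f : Int → Int) (l : List Int) :
    ∀ (k : Nat) (s : Int), k ≤ l.length →
      (s :: pvPresums f s l).getD k 0 = s + ((l.take k).map f).sum := by
  induction l with
  | nil =>
    intro k s hk
    simp only [List.length_nil, Nat.le_zero] at hk
    have : k = 0 := hk
    subst this; simp
  | cons v r ih =>
    intro k s hk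
    cases k with
    | zero => simp
    | succ k =>
      have := ih k (s + f v) (by simpa using hk)
      simp [pvPresums] at this ⊢
      rw [this]; ring

theorem pyGetD_pvPresums (f : Int → Int) (l : List Int) (i : Int)
    (h0 : 0 ≤ i) (h : i ≤ (l.length : Int)) :
    PySem.List.pyGetD (0 :: pvPresums f 0 l) i 0 = ((l.take i.toNat).map f).sum := by
  have hlen : ((0 :: pvPresums f 0 l).length : Int) = (l.length : Int) + 1 := by
    simp [length_pvPresums]
  rw [PySem.List.pyGetD_eq_getElem _ _ h0 (by omega)]
  have hk : i.toNat ≤ l.length := by omega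
  have hlt : i.toNat < (0 :: pvPresums f 0 l).length := by
    simp [length_pvPresums]; omega
  rw [← List.getD_eq_getElem (0 :: pvPresums f 0 l) 0 hlt,
      getD_pvPresums f l i.toNat 0 hk]
  ring

theorem count_eq_sum_ind (a : Int) (l : List Int) :
    (List.count a l : Int) = (l.map (fun v => if v = a then (1:Int) else 0)).sum := by
  induction l with
  | nil => simp
  | cons v r ih =>
    simp [List.count_cons, ih]
    by_cases h : v = a <;> simp [h]
    ring

-- prefix-difference = sum of f over the Python slice arr[s : s+y]
theorem diff_eq_slice_sum (f : Int → Int) (l : List Int) (s y : Int)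
    (h0 : 0 ≤ s) (hs : s < (l.length : Int)) (hy : 0 ≤ y) :
    ((l.take (min (s + y) (l.length : Int)).toNat).map f).sum - ((l.take s.toNat).map f).sum
      = ((PySem.List.slice l (some s) (some (s + y))).map f).sum := by
  rw [PySem.List.slice_toNat l h0 (by omega)]
  set a := s.toNat with ha
  set L := l.length with hL
  have hb : (s + y).toNat - a = y.toNat := by omega
  set e := (min (s + y) (L : Int)).toNat with he
  have hae : a ≤ e := by omega
  have hsplit : List.take e l = List.take a l ++ List.take (e - a) (List.drop a l) := by
    have heq : e = a + (e - a) := by omega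
    conv_lhs => rw [heq]
    rw [List.take_add]
  rw [hsplit]
  simp only [List.map_append, List.sum_append, add_sub_cancel_left, hb]
  congr 2
  have hdl : (List.drop a l).length = L - a := by simp [hL]
  by_cases hc : (s + y) ≤ (L : Int)
  · have : e - a = y.toNat := by omega
    rw [this]
  · have h1 : e - a = L - a := by omega
    rw [h1, List.take_of_length_le (by omega), List.take_of_length_le (by omega)]

-- per-start: B's prefix lookups compute exactly A's slice counts
theorem start_count_eq (a : Int) (l : List Int) (s y : Int)
    (h0 : 0 ≤ s) (hs : s < (l.length : Int)) (hy : 0 ≤ y) :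
    PySem.List.pyGetD (0 :: pvPresums (fun v => if v = a then (1:Int) else 0) 0 l) (min (s + y) (l.length : Int)) 0
      - PySem.List.pyGetD (0 :: pvPresums (fun v => if v = a then (1:Int) else 0) 0 l) s 0
    = (PySem.List.count (PySem.List.slice l (some s) (some (s + y))) a : Int) := by
  rw [pyGetD_pvPresums _ _ _ (by omega) (by omega),
      pyGetD_pvPresums _ _ _ h0 (by omega),
      PySem.List.count_eq, count_eq_sum_ind]
  exact diff_eq_slice_sum _ l s y h0 hs hy

theorem pvF1_eq : pvF1 = fun v => if v = 1 then (1:Int) else 0 := rfl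
theorem pvF0_eq : pvF0 = fun v => if v = 0 then (1:Int) else 0 := rfl

theorem inner_eq (arr : List Int) (mz y : Int) (hy : 0 ≤ y) :
    ∀ (l : List Int) (acc : Int × Int),
      (∀ s ∈ l, 0 ≤ s ∧ s < (arr.length : Int)) →
      pvInnerB (0 :: pvPresums pvF1 0 arr) (0 :: pvPresums pvF0 0 arr) mz (arr.length : Int) y l acc
        = pvInnerA arr mz y l acc := by
  intro l
  induction l with
  | nil => intro acc _; rfl
  | cons s rest ih =>
    intro acc hmem
    obtain ⟨hs0, hsn⟩ := hmem s (by simp)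
    have h1 := start_count_eq 1 arr s y hs0 hsn hy
    have h0 := start_count_eq 0 arr s y hs0 hsn hy
    rw [pvInnerB, pvInnerA]
    simp only [pvF1_eq, pvF0_eq] at *
    rw [h1, h0]
    split
    · rfl
    · exact ih _ (fun t ht => hmem t (by simp [ht]))

-- ===== VERDICT (by name: the statement is the Claim_ definition above) =====
theorem pvSearch_eq (arr : List Int) (max_zeros : Int) :
    pvSearchB arr max_zeros = pvSearchA arr max_zeros := by
  simp only [pvSearchA, pvSearchB, pvPrefixes_eq, pvCombos,
    List.foldl_flatMap, List.foldl_map, PySem.List.len_eq]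
  apply PySem.List.foldl_congr_mem
  intro st z hz
  apply PySem.List.foldl_congr_mem
  intro st x hx
  apply PySem.List.foldl_congr_mem
  intro st y hy
  have hz0 : 0 ≤ z := ((PySem.List.mem_pyRange_one).1 hz).1
  have hx1 : 1 ≤ x := ((PySem.List.mem_pyRange_one).1 hx).1
  have hy1 : 1 ≤ y := ((PySem.List.mem_pyRange_one).1 hy).1
  have hmem : ∀ s ∈ PySem.List.pyRange z (arr.length : Int) x, 0 ≤ s ∧ s < (arr.length : Int) := by
    intro s hsmem
    have := (PySem.List.mem_pyRange_iff_of_pos (by omega) s).1 hsmem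
    exact ⟨by omega, this.2.1⟩
  rw [inner_eq arr max_zeros y (by omega) _ _ hmem]

-- ===== VERDICT (by name: the statement is the Claim_ definition above) =====
theorem optimize_selection_spec : Claim_equal_optimize_selection := by
  intro arr max_zeros _
  show optimize_selection arr max_zeros = optimize_selection_alt arr max_zeros
  simp only [optimize_selection, optimize_selection_alt, pvSearch_eq]
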